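-- pv_equiv track=rewrite | github.com/marboka/python-course | week4/exam/exam.py | digit
-- ===== SOURCE A (Python) =====
-- def get_len(n):
--     """
--     Returns the length of a natural number `n`.
--     """
--     res = 0
--     while n > 0:
--         res += 1
--         n //= 10
--     return res
--
-- def digit (n,k):
--     if k<=0:
--         return -1
--     elif get_len(n)<k:
--         return 0
--     else:
--         for _ in range(k - 1):
--             n //= 10
--         return n % 10
-- ===== SOURCE B (Python) =====
-- def digit(n, k):
--     if k <= 0:
--         return -1
--     p = 1
--     for _ in range(k - 1):
--         if p > n:
--             return 0        # n has fewer than k digits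
--         p *= 10
--     return n // p % 10 if n >= p else 0
-- ===== Notes on version B (the rewrite author's own statement) =====
-- stated objective: alternative
-- what changed: Drops the get_len digit-count helper and the k-1 division-stripping loop; instead builds the power 10**(k-1) upward with an early exit as soon as it exceeds n, then extracts the digit with a single floordiv and mod.
import Mathlib
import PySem

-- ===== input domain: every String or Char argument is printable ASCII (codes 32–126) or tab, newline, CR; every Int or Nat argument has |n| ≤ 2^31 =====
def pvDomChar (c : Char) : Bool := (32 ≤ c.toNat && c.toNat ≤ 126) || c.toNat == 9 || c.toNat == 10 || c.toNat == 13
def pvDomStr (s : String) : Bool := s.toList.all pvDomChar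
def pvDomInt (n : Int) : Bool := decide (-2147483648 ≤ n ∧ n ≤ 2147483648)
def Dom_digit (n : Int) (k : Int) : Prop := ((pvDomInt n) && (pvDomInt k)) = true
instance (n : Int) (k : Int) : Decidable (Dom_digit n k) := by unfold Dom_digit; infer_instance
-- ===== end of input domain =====

-- B drops A's get_len helper and its k-1 division-stripping loop: it builds the power
-- 10^(k-1) upward with an early exit once it exceeds n, then one floordiv + mod (alternative).

-- ===== PORT A =====
-- helper get_len: `res = 0; while n > 0: res += 1; n //= 10` (ported as recursion on n)
def getLen (n : Int) : Int :=
  if h : n > 0 then 1 + getLen (PySem.Int.floordiv n 10) else 0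
termination_by n.toNat
decreasing_by
  rw [PySem.Int.floordiv_eq_ediv_of_pos (by norm_num : (0:Int) < 10)]
  have h1 : n / 10 < n := by
    rw [Int.ediv_lt_iff_lt_mul (by norm_num)]; nlinarith
  have h0 : 0 ≤ n / 10 := Int.ediv_nonneg (le_of_lt h) (by norm_num)
  omega

def digit (n : Int) (k : Int) : Int :=
  if k ≤ 0 then -1
  else if getLen n < k then 0
  else
    -- `for _ in range(k - 1): n //= 10` then `return n % 10`
    PySem.Int.mod
      ((PySem.List.pyRange 0 (k - 1) 1).foldl (fun m _ => PySem.Int.floordiv m 10) n)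
      10

-- ===== PORT B =====
-- `for _ in range(k - 1): if p > n: return 0; p *= 10` + the final conditional return,
-- ported as a recursion on the k-1 remaining iterations
def digitAltLoop (n : Int) (p : Int) : Nat → Int
  | 0 => if n ≥ p then PySem.Int.mod (PySem.Int.floordiv n p) 10 else 0
  | e + 1 => if p > n then 0 else digitAltLoop n (p * 10) e

def digit_alt (n : Int) (k : Int) : Int :=
  if k ≤ 0 then -1
  else digitAltLoop n 1 (k - 1).toNat

-- ===== PRECONDITION & SPEC =====
def Spec_digit (n : Int) (k : Int) (out : Int) : Prop := out = digit_alt n k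
instance (n : Int) (k : Int) (out : Int) : Decidable (Spec_digit n k out) := by unfold Spec_digit; infer_instance

-- ===== CLAIM (what is proved, stated in full; the proofs are below) =====
def Claim_equal_digit : Prop := ∀ (n : Int) (k : Int), Dom_digit n k → Spec_digit n k (digit n k)

-- ===== LEMMAS AND PROOFS =====

theorem getLen_nonneg (n : Int) : 0 ≤ getLen n := by
  induction n using getLen.induct with
  | case1 n h ih => rw [getLen]; rw [dif_pos h]; omega
  | case2 n h => rw [getLen]; rw [dif_neg h]

-- get_len n ≤ e  ↔  n < 10^e  (for every n, including n ≤ 0 where get_len n = 0)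
theorem getLen_le_iff (e : Nat) : ∀ (n : Int), getLen n ≤ (e : Int) ↔ n < 10 ^ e := by
  induction e with
  | zero =>
    intro n
    rw [getLen]
    split_ifs with h
    · have h0 := getLen_nonneg (PySem.Int.floordiv n 10)
      simp only [pow_zero, Nat.cast_zero]
      omega
    · simp only [pow_zero, Nat.cast_zero]
      omega
  | succ e ih =>
    intro n
    rw [getLen]
    split_ifs with h
    · rw [PySem.Int.floordiv_eq_ediv_of_pos (by norm_num : (0:Int) < 10)]
      have hdiv : n / 10 < 10 ^ e ↔ n < 10 ^ (e + 1) := by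
        rw [Int.ediv_lt_iff_lt_mul (by norm_num : (0:Int) < 10), pow_succ]
      have hih := ih (n / 10)
      push_cast
      omega
    · have hp : (0:Int) < 10 ^ (e + 1) := by positivity
      push_cast
      constructor <;> intro <;> omega

-- iterating `n //= 10` e times is floor-division by 10^e
theorem fold_div_pow (e : Nat) (n : Int) :
    (PySem.List.pyRange 0 (e : Int) 1).foldl (fun m _ => PySem.Int.floordiv m 10) n
      = PySem.Int.floordiv n ((10 : Int) ^ e) := by
  induction e generalizing n with
  | zero =>
    rw [Nat.cast_zero, PySem.List.pyRange_one_eq_nil (le_refl (0:Int)), List.foldl_nil,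
        pow_zero, PySem.Int.floordiv_eq_ediv_of_pos (by norm_num : (0:Int) < 1),
        Int.ediv_one]
  | succ e ih =>
    have hsplit : PySem.List.pyRange 0 ((e : Int) + 1) 1
        = PySem.List.pyRange 0 (e : Int) 1 ++ [(e : Int)] :=
      PySem.List.pyRange_one_succ_right (by positivity)
    push_cast
    rw [hsplit, List.foldl_append, ih]
    simp only [List.foldl_cons, List.foldl_nil]
    rw [PySem.Int.floordiv_eq_ediv_of_pos (by positivity : (0:Int) < 10 ^ e),
        PySem.Int.floordiv_eq_ediv_of_pos (by norm_num : (0:Int) < 10),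
        PySem.Int.floordiv_eq_ediv_of_pos (by positivity : (0:Int) < 10 ^ (e + 1)),
        Int.ediv_ediv_of_nonneg (by positivity : (0:Int) ≤ 10 ^ e), ← pow_succ]

-- B's loop at p = 10^c computes the closed form over the remaining e iterations
theorem altLoop_eq (e : Nat) : ∀ (c : Nat) (n : Int),
    digitAltLoop n ((10 : Int) ^ c) e
      = if n < (10 : Int) ^ (c + e) then 0
        else PySem.Int.mod (PySem.Int.floordiv n ((10 : Int) ^ (c + e))) 10 := by
  induction e with
  | zero =>
    intro c n
    rw [digitAltLoop, Nat.add_zero]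
    by_cases hlt : n < (10 : Int) ^ c
    · rw [if_neg (by omega), if_pos hlt]
    · rw [if_pos (by omega), if_neg hlt]
  | succ e ih =>
    intro c n
    rw [digitAltLoop]
    by_cases hp : (10 : Int) ^ c > n
    · have : n < (10 : Int) ^ (c + (e + 1)) := by
        have : (10 : Int) ^ c ≤ 10 ^ (c + (e + 1)) :=
          pow_le_pow_right₀ (by norm_num) (by omega)
        omega
      rw [if_pos hp, if_pos this]
    · rw [if_neg hp, ← pow_succ, ih (c + 1) n,
          show c + 1 + e = c + (e + 1) by omega]

-- ===== VERDICT (by name: the statement is the Claim_ definition above) =====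
theorem digit_spec : Claim_equal_digit := by
  intro n k _
  unfold Spec_digit digit digit_alt
  by_cases hk : k ≤ 0
  · rw [if_pos hk, if_pos hk]
  · rw [if_neg hk, if_neg hk]
    have he : ((k - 1).toNat : Int) = k - 1 := Int.toNat_of_nonneg (by omega)
    have hbranch : getLen n < k ↔ n < (10 : Int) ^ (k - 1).toNat := by
      rw [← getLen_le_iff (k - 1).toNat n, he]; omega
    have hB : digitAltLoop n 1 (k - 1).toNat
        = if n < (10 : Int) ^ (k - 1).toNat then 0
          else PySem.Int.mod (PySem.Int.floordiv n ((10 : Int) ^ (k - 1).toNat)) 10 := by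
      have h := altLoop_eq (k - 1).toNat 0 n
      rw [pow_zero] at h
      rw [h, Nat.zero_add]
    rw [hB]
    by_cases hlt : n < (10 : Int) ^ (k - 1).toNat
    · rw [if_pos (hbranch.mpr hlt), if_pos hlt]
    · rw [if_neg (fun hx => hlt (hbranch.mp hx)), if_neg hlt]
      conv_lhs => rw [← he]
      rw [fold_div_pow]
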